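-- pv_equiv track=rewrite | github.com/Stepanvar/MetaGap | MetaGap/MetagapUserCode/merge_vcf/metadata.py | _split_metadata_segments
-- ===== SOURCE A (Python) =====
-- def _split_metadata_segments(raw_line: str) -> list[str]:
--     """Split concatenated metadata segments into individual ``##`` records."""
--
--     if raw_line is None:
--         return []
--
--     text = raw_line.strip()
--     if not text:
--         return []
--
--     # Ensure the string begins with ``##`` before scanning for additional segments.
--     if not text.startswith("##"):
--         text = "##" + text.lstrip("#")
--
--     segments: list[str] = []
--     start = 0
--     length = len(text)
--
--     while start < length:
--         if not text.startswith("##", start):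
--             # Residual text without a ``##`` prefix is coerced into a valid segment.
--             remainder = text[start:].strip()
--             if remainder:
--                 if not remainder.startswith("##"):
--                     remainder = "##" + remainder.lstrip("#")
--                 segments.append(remainder)
--             break
--
--         next_start = text.find("##", start + 2)
--         segment = text[start:] if next_start == -1 else text[start:next_start]
--         segment = segment.strip()
--         if segment:
--             if not segment.startswith("##"):
--                 segment = "##" + segment.lstrip("#")
--             segments.append(segment)
--
--         if next_start == -1:
--             break
--         start = next_start
--
--     return segments
-- ===== SOURCE B (Python) =====
-- def _split_metadata_segments(raw_line):
--     """Split concatenated metadata segments into individual ``##`` records."""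
--
--     if raw_line is None:
--         return []
--
--     text = raw_line.strip()
--     if not text:
--         return []
--
--     if not text.startswith("##"):
--         text = "##" + text.lstrip("#")
--
--     # text starts with "##", so every piece after the first split element is
--     # one segment; re-prefix it and trim trailing whitespace.
--     return ["##" + part.rstrip() for part in text.split("##")[1:]]
-- ===== Notes on version B (the rewrite author's own statement) =====
-- stated objective: idiomatic
-- what changed: A's manual while-loop that scans for each next '##' with find() and slices/normalizes segments is replaced by a single text.split('##') pass whose pieces are re-prefixed with '##' and right-stripped.
import Mathlib
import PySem

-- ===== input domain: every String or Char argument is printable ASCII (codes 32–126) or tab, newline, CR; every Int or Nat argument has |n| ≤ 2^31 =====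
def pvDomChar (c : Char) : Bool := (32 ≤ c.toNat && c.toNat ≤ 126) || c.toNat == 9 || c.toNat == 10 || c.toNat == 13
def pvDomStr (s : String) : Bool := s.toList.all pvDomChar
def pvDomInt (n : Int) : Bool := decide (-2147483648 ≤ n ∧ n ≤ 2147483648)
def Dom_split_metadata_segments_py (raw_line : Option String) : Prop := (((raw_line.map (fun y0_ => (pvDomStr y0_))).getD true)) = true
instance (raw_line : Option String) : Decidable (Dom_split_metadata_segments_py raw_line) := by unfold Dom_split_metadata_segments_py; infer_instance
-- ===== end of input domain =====

-- B replaces A's manual index-scanning while-loop by one split("##") pass over the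
-- normalized text (same values; objective: simpler/idiomatic).


-- ===== PORT A =====
-- s.lstrip('#'): drop leading '#' characters (exact; PySem has no chars-argument lstrip)
def pvLstripHash (cs : List Char) : List Char := cs.dropWhile (· == '#')

-- the normalization both Python sources contain verbatim:
-- if not s.startswith("##"): s = "##" + s.lstrip("#")
def pvNorm (cs : List Char) : List Char :=
  if PySem.Chars.startswith cs ['#', '#'] then cs else '#' :: '#' :: pvLstripHash cs

-- A's while-loop; fuel ≥ number of iterations (start grows by ≥ 2 per iteration).
-- text.startswith("##", start) with 0 ≤ start ≤ len is ported as startswith on text.drop start (exact there).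
def pvScanA (text : List Char) : Nat → Nat → List (List Char) → List (List Char)
  | 0, _, segments => segments
  | fuel + 1, start, segments =>
    if start < text.length then
      if ¬ (PySem.Chars.startswith (text.drop start) ['#', '#']) then
        -- residual text without a "##" prefix
        let remainder := PySem.Chars.strip (text.drop start)
        if remainder ≠ [] then segments ++ [pvNorm remainder] else segments
      else
        let next := PySem.Chars.findFrom text ['#', '#'] ((start : Int) + 2)
        let segment := if next = -1 then text.drop start
                       else PySem.Chars.slice text (some (start : Int)) (some next)
        let segment := PySem.Chars.strip segment
        let segments := if segment ≠ [] then segments ++ [pvNorm segment] else segments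
        if next = -1 then segments else pvScanA text fuel next.toNat segments
    else segments

def split_metadata_segments_py (raw_line : Option String) : List String :=
  match raw_line with
  | none => []
  | some raw =>
    let text := PySem.Chars.strip raw.toList
    if text = [] then []
    else
      let text := pvNorm text
      (pvScanA text (text.length + 1) 0 []).map (fun cs => String.ofList cs)

-- ===== PORT B =====
def split_metadata_segments_py_alt (raw_line : Option String) : List String :=
  match raw_line with
  | none => []
  | some raw =>
    let text := PySem.Chars.strip raw.toList
    if text = [] then []
    else
      let text := pvNorm text
      -- ["##" + part.rstrip() for part in text.split("##")[1:]]
      ((PySem.Chars.splitOn text ['#', '#']).drop 1).map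
        (fun part => String.ofList ('#' :: '#' :: PySem.Chars.rstrip part))

-- ===== PRECONDITION & SPEC =====
def Spec_split_metadata_segments_py (raw_line : Option String) (out : List String) : Prop := out = split_metadata_segments_py_alt raw_line
instance (raw_line : Option String) (out : List String) : Decidable (Spec_split_metadata_segments_py raw_line out) := by unfold Spec_split_metadata_segments_py; infer_instance

-- ===== CLAIM (what is proved, stated in full; the proofs are below) =====
def Claim_equal_split_metadata_segments_py : Prop := ∀ (raw_line : Option String), Dom_split_metadata_segments_py raw_line → Spec_split_metadata_segments_py raw_line (split_metadata_segments_py raw_line)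

-- ===== LEMMAS AND PROOFS =====

def pvPieces (l : List Char) : List (List Char) :=
  let j := PySem.Chars.find l ['#', '#']
  if h : j = -1 then [l]
  else l.take j.toNat :: pvPieces (l.drop (j.toNat + 2))
termination_by l.length
decreasing_by
  have hinf : ['#', '#'] <:+: l := (PySem.Chars.find_ne_neg_one_iff l ['#', '#']).mp h
  have hlen : 2 ≤ l.length := by simpa using hinf.length_le
  simp only [List.length_drop]
  omega

lemma pvFindGo_shift (l : List Char) (k : Nat) :
    PySem.Chars.find.go ['#', '#'] l k =
      if PySem.Chars.find.go ['#', '#'] l 0 = -1 then -1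
      else (k : Int) + PySem.Chars.find.go ['#', '#'] l 0 := by
  induction l generalizing k with
  | nil => simp [PySem.Chars.find.go]
  | cons c rest ih =>
    by_cases hp : List.isPrefixOf ['#', '#'] (c :: rest)
    · simp [PySem.Chars.find.go, hp]
    · have hge : -1 ≤ PySem.Chars.find.go ['#', '#'] rest 0 := by
        have := PySem.Chars.neg_one_le_find rest ['#', '#']
        simpa [PySem.Chars.find] using this
      conv_lhs => rw [PySem.Chars.find.go]
      conv_rhs => rw [PySem.Chars.find.go]
      simp only [hp, if_false, Bool.false_eq_true]
      rw [ih (k + 1), ih 1]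
      split_ifs <;> push_cast <;> omega

lemma pvGo_pieces (fuel : Nat) :
    ∀ (l cur : List Char) (acc : List (List Char)), l.length < fuel →
      PySem.Chars.splitOn.go ['#', '#'] fuel l cur acc =
        acc.reverse ++ (pvPieces l).modifyHead (cur.reverse ++ ·) := by
  induction fuel with
  | zero => intro l cur acc h; omega
  | succ f ih =>
    intro l cur acc h
    match l with
    | [] =>
      rw [PySem.Chars.splitOn.go]
      · rw [pvPieces]
        simp [PySem.Chars.find, PySem.Chars.find.go]
      · omega
    | c :: rest =>
      rw [PySem.Chars.splitOn.go]
      by_cases hp : List.isPrefixOf ['#', '#'] (c :: rest)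
      · simp only [hp, if_true]
        rw [ih _ _ _ (by simp at h ⊢; omega)]
        have hfind : PySem.Chars.find (c :: rest) ['#', '#'] = 0 := by
          simp [PySem.Chars.find, PySem.Chars.find.go, hp]
        conv_rhs => rw [pvPieces]
        rw [dif_neg (by rw [hfind]; norm_num)]
        simp [hfind]
        cases pvPieces rest.tail <;> simp [List.modifyHead]
      · simp only [hp, if_false, Bool.false_eq_true]
        rw [ih _ _ _ (by simp at h ⊢; omega)]
        have hshift : PySem.Chars.find (c :: rest) ['#', '#'] =
            if PySem.Chars.find rest ['#', '#'] = -1 then -1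
            else 1 + PySem.Chars.find rest ['#', '#'] := by
          simp only [PySem.Chars.find]
          conv_lhs => rw [PySem.Chars.find.go]
          simp only [hp, if_false, Bool.false_eq_true]
          rw [pvFindGo_shift]
          norm_num
        by_cases hrf : PySem.Chars.find rest ['#', '#'] = -1
        · have h1 : PySem.Chars.find (c :: rest) ['#', '#'] = -1 := by rw [hshift]; simp [hrf]
          conv_lhs => rw [pvPieces]
          conv_rhs => rw [pvPieces]
          rw [dif_pos hrf, dif_pos h1]
          simp
        · have hge : 0 ≤ PySem.Chars.find rest ['#', '#'] := by
            have := PySem.Chars.neg_one_le_find rest ['#', '#']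
            omega
          obtain ⟨jn, hj⟩ : ∃ jn : Nat, PySem.Chars.find rest ['#', '#'] = jn :=
            ⟨(PySem.Chars.find rest ['#', '#']).toNat, (Int.toNat_of_nonneg hge).symm⟩
          have h1 : PySem.Chars.find (c :: rest) ['#', '#'] = (jn : Int) + 1 := by
            rw [hshift]; simp [hj]; ring
          have h1ne : ¬ (PySem.Chars.find (c :: rest) ['#', '#'] = -1) := by rw [h1]; omega
          conv_lhs => rw [pvPieces]
          conv_rhs => rw [pvPieces]
          rw [dif_neg hrf, dif_neg h1ne]
          have ht1 : ((jn : Int) + 1).toNat = jn + 1 := by omega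
          have ht2 : ((jn : Int)).toNat = jn := by omega
          simp only [hj, h1, ht1, ht2]
          simp [List.take_succ_cons, List.drop_succ_cons, List.modifyHead]

lemma pvSplitOn_eq_pieces (l : List Char) :
    PySem.Chars.splitOn l ['#', '#'] = pvPieces l := by
  rw [PySem.Chars.splitOn, pvGo_pieces (l.length + 1) l [] [] (by omega)]
  cases pvPieces l <;> simp [List.modifyHead]

lemma pvRstrip_hash (l : List Char) :
    PySem.Chars.rstrip ('#' :: l) = '#' :: PySem.Chars.rstrip l := by
  have hns : PySem.Chars.isspace '#' = false := by decide
  simp only [PySem.Chars.rstrip, List.reverse_cons, List.dropWhile_append]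
  by_cases h : (List.dropWhile PySem.Chars.isspace l.reverse).isEmpty
  · simp only [List.isEmpty_iff, List.dropWhile_eq_nil_iff] at h
    simp [List.dropWhile, hns]
  · simp [h]

lemma pvStrip_hash (l : List Char) :
    PySem.Chars.strip ('#' :: '#' :: l) = '#' :: '#' :: PySem.Chars.rstrip l := by
  have hns : PySem.Chars.isspace '#' = false := by decide
  simp [PySem.Chars.strip, PySem.Chars.lstrip, List.dropWhile, hns, pvRstrip_hash]

lemma pvFind_hash (l : List Char) : PySem.Chars.find ('#' :: '#' :: l) ['#', '#'] = 0 := by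
  simp [PySem.Chars.find, PySem.Chars.find.go, List.isPrefixOf]

lemma pvNorm_hash (l : List Char) : pvNorm ('#' :: '#' :: l) = '#' :: '#' :: l := by
  simp [pvNorm, PySem.Chars.startswith, List.isPrefixOf]

lemma pvScanA_eq (n : Nat) :
    ∀ (text : List Char) (start fuel : Nat) (segs : List (List Char)) (rest : List Char),
      rest.length = n → text.drop start = '#' :: '#' :: rest → n < fuel →
      pvScanA text fuel start segs =
        segs ++ (pvPieces rest).map (fun p => '#' :: '#' :: PySem.Chars.rstrip p) := by
  induction n using Nat.strong_induction_on with
  | _ n ih =>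
  intro text start fuel segs rest hn hdrop hfuel
  have hlen2 : (text.drop start).length = rest.length + 2 := by rw [hdrop]; simp
  have hlen : start + rest.length + 2 = text.length := by
    simp [List.length_drop] at hlen2; omega
  obtain ⟨f, rfl⟩ : ∃ f, fuel = f + 1 := ⟨fuel - 1, by omega⟩
  rw [pvScanA]
  rw [if_pos (by omega)]
  have hsw : PySem.Chars.startswith (text.drop start) ['#', '#'] = true := by
    rw [hdrop]; simp [PySem.Chars.startswith, List.isPrefixOf]
  rw [hsw]
  simp only [not_true, if_false]
  have hdrop2 : text.drop (start + 2) = rest := by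
    have h2 : List.drop 2 (text.drop start) = rest := by rw [hdrop]; rfl
    rwa [List.drop_drop] at h2
  have hff : PySem.Chars.findFrom text ['#', '#'] ((start : Int) + 2) =
      if PySem.Chars.find rest ['#', '#'] = -1 then -1
      else ((start + 2 : Nat) : Int) + PySem.Chars.find rest ['#', '#'] := by
    have hcast : ((start : Int) + 2) = ((start + 2 : Nat) : Int) := by push_cast; ring
    rw [hcast, PySem.Chars.findFrom_natCast text ['#', '#'] (start + 2) (by omega), hdrop2]
  by_cases hrf : PySem.Chars.find rest ['#', '#'] = -1
  · -- no further "##": single final segment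
    rw [hff, if_pos hrf, hdrop]
    rw [pvPieces, dif_pos hrf]
    simp [pvStrip_hash, pvNorm_hash]
  · have hge : 0 ≤ PySem.Chars.find rest ['#', '#'] := by
      have := PySem.Chars.neg_one_le_find rest ['#', '#']
      omega
    obtain ⟨jn, hj⟩ : ∃ jn : Nat, PySem.Chars.find rest ['#', '#'] = jn :=
      ⟨(PySem.Chars.find rest ['#', '#']).toNat, (Int.toNat_of_nonneg hge).symm⟩
    have hnext : PySem.Chars.findFrom text ['#', '#'] ((start : Int) + 2) =
        ((start + 2 + jn : Nat) : Int) := by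
      rw [hff, if_neg hrf, hj]; push_cast; ring
    have hne' : ¬ (((start + 2 + jn : Nat) : Int) = -1) := by omega
    -- the sliced segment is "##" ++ rest.take jn
    have hslice : PySem.Chars.slice text (some (start : Int)) (some ((start + 2 + jn : Nat) : Int)) =
        '#' :: '#' :: rest.take jn := by
      rw [PySem.Chars.slice_eq_listSlice, PySem.List.slice_natCast]
      rw [hdrop]
      have h3 : start + 2 + jn - start = 2 + jn := by omega
      rw [h3]
      simp [List.take_cons]
    -- the found occurrence: rest.drop jn = "##" ++ t
    have hspec := PySem.Chars.find_spec (s := rest) (sub := ['#', '#']) (by omega)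
    rw [hj] at hspec
    have htoNat : ((jn : Int)).toNat = jn := by omega
    rw [htoNat] at hspec
    obtain ⟨t, ht⟩ := hspec.1
    have hdropt : text.drop (start + 2 + jn) = '#' :: '#' :: t := by
      have h1 : List.drop jn (text.drop (start + 2)) = text.drop (start + 2 + jn) := by
        rw [List.drop_drop]
      rw [← h1, hdrop2]
      exact ht.symm
    have hjlen : jn + 2 ≤ rest.length := by
      have h4 := congrArg List.length ht
      simp [List.length_drop] at h4
      omega
    have htlen : t.length = rest.length - jn - 2 := by
      have h4 := congrArg List.length ht
      simp [List.length_drop] at h4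
      omega
    have hdt : rest.drop (jn + 2) = t := by
      have h5 : List.drop 2 (List.drop jn rest) = t := by rw [← ht]; rfl
      rwa [List.drop_drop] at h5
    have htoNat2 : (((start + 2 + jn : Nat) : Int)).toNat = start + 2 + jn := by omega
    rw [hnext, if_neg hne', hslice, if_neg hne', pvStrip_hash, htoNat2]
    rw [if_pos (by simp : ¬ ('#' :: '#' :: PySem.Chars.rstrip (rest.take jn) = []))]
    rw [ih t.length (by omega) text (start + 2 + jn) f _ t rfl hdropt (by omega)]
    -- unfold pvPieces on the right
    conv_rhs => rw [pvPieces]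
    rw [dif_neg hrf]
    have htnat : (PySem.Chars.find rest ['#', '#']).toNat = jn := by rw [hj]; omega
    rw [htnat, hdt]
    simp [pvNorm_hash]

lemma pvPieces_hash (rest : List Char) :
    pvPieces ('#' :: '#' :: rest) = [] :: pvPieces rest := by
  rw [pvPieces]
  rw [dif_neg (by rw [pvFind_hash]; norm_num)]
  simp [pvFind_hash]

-- ===== VERDICT (by name: the statement is the Claim_ definition above) =====
theorem split_metadata_segments_py_spec : Claim_equal_split_metadata_segments_py := by
  intro raw_line _hdom
  unfold Spec_split_metadata_segments_py
  match raw_line with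
  | none => rfl
  | some raw =>
    unfold split_metadata_segments_py split_metadata_segments_py_alt
    by_cases h0 : PySem.Chars.strip raw.toList = []
    · simp [h0]
    · simp only [if_neg h0]
      obtain ⟨rest, hrest⟩ : ∃ rest, pvNorm (PySem.Chars.strip raw.toList) = '#' :: '#' :: rest := by
        unfold pvNorm
        split_ifs with hsw
        · obtain ⟨r, hr⟩ := (PySem.Chars.startswith_iff _ _).mp hsw
          exact ⟨r, hr.symm⟩
        · exact ⟨pvLstripHash (PySem.Chars.strip raw.toList), rfl⟩
      rw [hrest]
      rw [pvScanA_eq rest.length ('#' :: '#' :: rest) 0 (('#' :: '#' :: rest).length + 1) [] rest rfl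
          (by simp) (by simp; omega)]
      rw [pvSplitOn_eq_pieces, pvPieces_hash]
      simp [List.map_map, Function.comp]
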